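-- pv_equiv track=rewrite | github.com/pettarin/export-kobo | old/export_Kobo_notes_3.py | print_hr
-- ===== SOURCE A (Python) =====
-- ANNOTATION="annotation"
--
-- HIGHLIGHT="highlight"
--
-- def print_hr(data):
--
--     acc = ""
--
--     for d in data:
--         [f_type, booktitle, text, annotation, date_created, date_modified] = d
--
--         if (f_type == ANNOTATION):
--             acc += "Type: %s\n" % (f_type)
--             acc += "Title: %s\n" % (booktitle)
--             acc += "Reference text: %s\n" % (text)
--             acc += "Annotation: %s\n" % (annotation)
--             acc += "Date created: %s\n" % (date_created)
--             acc += "Date modified: %s\n" % (date_modified)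
--             acc += "\n"
--
--         if (f_type == HIGHLIGHT):
--             acc += "Type: %s\n" % (f_type)
--             acc += "Title: %s\n" % (booktitle)
--             acc += "Reference text: %s\n" % (text)
--             acc += "Date created: %s\n" % (date_created)
--             acc += "\n"
--
--     return acc.strip()
-- ===== SOURCE B (Python) =====
-- ANNOTATION = "annotation"
--
-- HIGHLIGHT = "highlight"
--
-- _SPECS = {
--     ANNOTATION: [("Type", 0), ("Title", 1), ("Reference text", 2),
--                  ("Annotation", 3), ("Date created", 4), ("Date modified", 5)],
--     HIGHLIGHT: [("Type", 0), ("Title", 1), ("Reference text", 2),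
--                 ("Date created", 4)],
-- }
--
--
-- def print_hr(data):
--     blocks = []
--     for d in data:
--         spec = _SPECS.get(d[0], [])
--         if spec:
--             blocks.append("".join("%s: %s\n" % (label, d[i]) for label, i in spec))
--     return "\n".join(blocks).strip()
-- ===== Notes on version B (the rewrite author's own statement) =====
-- stated objective: idiomatic
-- what changed: Replaces the two hard-coded format branches and string accumulation with a table-driven design: a dict maps each record type to an ordered (label, field-index) spec, each record renders to a block by joining the spec's lines, and the blocks are '\n'-joined at the end.
import Mathlib
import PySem

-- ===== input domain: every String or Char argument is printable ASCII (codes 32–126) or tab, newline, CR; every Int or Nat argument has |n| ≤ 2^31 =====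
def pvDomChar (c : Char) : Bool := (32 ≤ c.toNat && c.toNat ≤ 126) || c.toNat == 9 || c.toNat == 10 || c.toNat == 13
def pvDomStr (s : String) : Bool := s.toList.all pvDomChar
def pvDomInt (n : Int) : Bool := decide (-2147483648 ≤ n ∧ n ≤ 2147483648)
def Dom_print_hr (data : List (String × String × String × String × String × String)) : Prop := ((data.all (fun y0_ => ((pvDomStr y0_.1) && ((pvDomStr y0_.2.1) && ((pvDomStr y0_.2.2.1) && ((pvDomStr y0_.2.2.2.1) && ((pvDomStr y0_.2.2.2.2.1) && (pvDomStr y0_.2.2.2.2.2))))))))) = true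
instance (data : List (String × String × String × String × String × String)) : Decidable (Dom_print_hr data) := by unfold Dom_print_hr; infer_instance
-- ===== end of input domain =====

-- B replaces A's two hard-coded format branches by a table: a dict maps each record
-- type to an ordered (label, field-index) spec, records render to blocks via the spec,
-- and blocks are "\n"-joined then stripped (objective: idiomatic; same return value).

-- ===== PORT A =====
def print_hr (data : List (String × String × String × String × String × String)) : String :=
  PySem.Str.strip (data.foldl (fun acc d =>
    let f_type := d.1
    let booktitle := d.2.1
    let text := d.2.2.1
    let annotation := d.2.2.2.1
    let date_created := d.2.2.2.2.1
    let date_modified := d.2.2.2.2.2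
    let acc := if f_type == "annotation" then
        acc ++ ("Type: " ++ f_type ++ "\n")
            ++ ("Title: " ++ booktitle ++ "\n")
            ++ ("Reference text: " ++ text ++ "\n")
            ++ ("Annotation: " ++ annotation ++ "\n")
            ++ ("Date created: " ++ date_created ++ "\n")
            ++ ("Date modified: " ++ date_modified ++ "\n")
            ++ "\n"
      else acc
    if f_type == "highlight" then
        acc ++ ("Type: " ++ f_type ++ "\n")
            ++ ("Title: " ++ booktitle ++ "\n")
            ++ ("Reference text: " ++ text ++ "\n")
            ++ ("Date created: " ++ date_created ++ "\n")
            ++ "\n"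
      else acc) "")

-- ===== PORT B =====
def hrSpecs : PySem.Dict String (List (String × Nat)) :=
  PySem.Dict.ofList
    [("annotation", [("Type", 0), ("Title", 1), ("Reference text", 2),
                     ("Annotation", 3), ("Date created", 4), ("Date modified", 5)]),
     ("highlight", [("Type", 0), ("Title", 1), ("Reference text", 2),
                    ("Date created", 4)])]

-- d[i] on the 6-tuple record
def hrField (d : String × String × String × String × String × String) (i : Nat) : String :=
  match i with
  | 0 => d.1
  | 1 => d.2.1
  | 2 => d.2.2.1
  | 3 => d.2.2.2.1
  | 4 => d.2.2.2.2.1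
  | _ => d.2.2.2.2.2

def print_hr_alt (data : List (String × String × String × String × String × String)) : String :=
  let blocks := data.foldl (fun blocks d =>
    let spec := hrSpecs.getD d.1 []
    if spec.isEmpty then blocks
    else blocks ++ [PySem.Str.join "" (spec.map (fun li => li.1 ++ ": " ++ hrField d li.2 ++ "\n"))]) []
  PySem.Str.strip (PySem.Str.join "\n" blocks)

-- ===== PRECONDITION & SPEC =====
def Spec_print_hr (data : List (String × String × String × String × String × String)) (out : String) : Prop := out = print_hr_alt data
instance (data : List (String × String × String × String × String × String)) (out : String) : Decidable (Spec_print_hr data out) := by unfold Spec_print_hr; infer_instance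

-- ===== CLAIM (what is proved, stated in full; the proofs are below) =====
def Claim_equal_print_hr : Prop := ∀ (data : List (String × String × String × String × String × String)), Dom_print_hr data → Spec_print_hr data (print_hr data)

-- ===== LEMMAS AND PROOFS =====

-- the block B renders for an annotation / a highlight record (one "\n" per line)
def pvAnn (d : String × String × String × String × String × String) : String :=
  "Type" ++ ": " ++ d.1 ++ "\n" ++ ("Title" ++ ": " ++ d.2.1 ++ "\n" ++
  ("Reference text" ++ ": " ++ d.2.2.1 ++ "\n" ++ ("Annotation" ++ ": " ++ d.2.2.2.1 ++ "\n" ++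
  ("Date created" ++ ": " ++ d.2.2.2.2.1 ++ "\n" ++ ("Date modified" ++ ": " ++ d.2.2.2.2.2 ++ "\n")))))

def pvHl (d : String × String × String × String × String × String) : String :=
  "Type" ++ ": " ++ d.1 ++ "\n" ++ ("Title" ++ ": " ++ d.2.1 ++ "\n" ++
  ("Reference text" ++ ": " ++ d.2.2.1 ++ "\n" ++ ("Date created" ++ ": " ++ d.2.2.2.2.1 ++ "\n")))

def pvBlk? (d : String × String × String × String × String × String) : Option String :=
  if d.1 == "annotation" then some (pvAnn d)
  else if d.1 == "highlight" then some (pvHl d) else none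

def pvBlocks (data : List (String × String × String × String × String × String)) : List String :=
  data.flatMap (fun d => (pvBlk? d).toList)

def pvConcat (l : List String) : String := l.foldr (· ++ ·) ""

lemma pvConcat_nil : pvConcat [] = "" := rfl

lemma pvConcat_cons (x : String) (xs : List String) : pvConcat (x :: xs) = x ++ pvConcat xs := rfl

lemma pvConcat_toList (l : List String) :
    (pvConcat l).toList = (l.map String.toList).flatten := by
  induction l with
  | nil => simp [pvConcat]
  | cons x xs ih => simp [pvConcat_cons, String.toList_append, ih]

lemma pvFoldA (data : List (String × String × String × String × String × String)) :
    ∀ acc : String,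
      data.foldl (fun acc d =>
        let f_type := d.1
        let booktitle := d.2.1
        let text := d.2.2.1
        let annotation := d.2.2.2.1
        let date_created := d.2.2.2.2.1
        let date_modified := d.2.2.2.2.2
        let acc := if f_type == "annotation" then
            acc ++ ("Type: " ++ f_type ++ "\n")
                ++ ("Title: " ++ booktitle ++ "\n")
                ++ ("Reference text: " ++ text ++ "\n")
                ++ ("Annotation: " ++ annotation ++ "\n")
                ++ ("Date created: " ++ date_created ++ "\n")
                ++ ("Date modified: " ++ date_modified ++ "\n")
                ++ "\n"
          else acc
        if f_type == "highlight" then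
            acc ++ ("Type: " ++ f_type ++ "\n")
                ++ ("Title: " ++ booktitle ++ "\n")
                ++ ("Reference text: " ++ text ++ "\n")
                ++ ("Date created: " ++ date_created ++ "\n")
                ++ "\n"
          else acc) acc
      = acc ++ pvConcat ((pvBlocks data).map (· ++ "\n")) := by
  induction data with
  | nil => intro acc; simp [pvBlocks, pvConcat]
  | cons d ds ih =>
    intro acc
    simp only [List.foldl_cons, ih, pvBlocks, List.flatMap_cons, List.map_append]
    by_cases h1 : d.1 = "annotation"
    · simp [pvBlk?, h1, pvAnn, pvConcat_cons, String.append_assoc]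
    · by_cases h2 : d.1 = "highlight"
      · simp [pvBlk?, h2, pvHl, pvConcat_cons, String.append_assoc]
      · simp [pvBlk?, h1, h2]

lemma pvJoinEmptySep (l : List String) : PySem.Str.join "" l = pvConcat l := by
  rw [← String.toList_inj, PySem.Str.toList_join, pvConcat_toList]
  induction l with
  | nil => rfl
  | cons x xs ih =>
    cases xs with
    | nil => simp [PySem.Chars.join_singleton]
    | cons y ys =>
      rw [List.map_cons, List.map_cons, PySem.Chars.join_cons_cons, ← List.map_cons, ih]
      simp

lemma pvSpecAnn : hrSpecs.getD "annotation" [] =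
    [("Type", 0), ("Title", 1), ("Reference text", 2),
     ("Annotation", 3), ("Date created", 4), ("Date modified", 5)] := rfl

lemma pvSpecHl : hrSpecs.getD "highlight" [] =
    [("Type", 0), ("Title", 1), ("Reference text", 2), ("Date created", 4)] := rfl

lemma pvSpecNone (k : String) (h1 : k ≠ "annotation") (h2 : k ≠ "highlight") :
    hrSpecs.getD k [] = [] := by
  have : hrSpecs = (PySem.Dict.empty.insert "annotation"
      [("Type", 0), ("Title", 1), ("Reference text", 2),
       ("Annotation", 3), ("Date created", 4), ("Date modified", 5)]).insert "highlight"
      [("Type", 0), ("Title", 1), ("Reference text", 2), ("Date created", 4)] := rfl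
  rw [this, PySem.Dict.getD_insert, if_neg h2, PySem.Dict.getD_insert, if_neg h1,
    PySem.Dict.getD_empty]

lemma pvLine (a b c : String) (h : a ++ b = c) (r : String) : a ++ (b ++ r) = c ++ r := by
  rw [← String.append_assoc, h]

set_option maxHeartbeats 800000 in
lemma pvFoldB (data : List (String × String × String × String × String × String)) :
    ∀ acc : List String,
      data.foldl (fun blocks d =>
        let spec := hrSpecs.getD d.1 []
        if spec.isEmpty then blocks
        else blocks ++ [PySem.Str.join "" (spec.map (fun li => li.1 ++ ": " ++ hrField d li.2 ++ "\n"))]) acc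
      = acc ++ pvBlocks data := by
  induction data with
  | nil => intro acc; simp [pvBlocks]
  | cons d ds ih =>
    intro acc
    simp only [List.foldl_cons, ih, pvBlocks, List.flatMap_cons]
    by_cases h1 : d.1 = "annotation"
    · rw [h1, pvSpecAnn]
      simp [pvBlk?, h1, pvAnn, hrField, pvJoinEmptySep, pvConcat_cons, pvConcat_nil,
        String.append_assoc]
      simp only [pvLine "Title" ": " "Title: " rfl,
        pvLine "Reference text" ": " "Reference text: " rfl, pvLine "Annotation" ": " "Annotation: " rfl,
        pvLine "Date created" ": " "Date created: " rfl, pvLine "Date modified" ": " "Date modified: " rfl]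
    · by_cases h2 : d.1 = "highlight"
      · rw [h2, pvSpecHl]
        simp [pvBlk?, h2, pvHl, hrField, pvJoinEmptySep, pvConcat_cons, pvConcat_nil,
          String.append_assoc]
        simp only [pvLine "Title" ": " "Title: " rfl,
        pvLine "Reference text" ": " "Reference text: " rfl,
        pvLine "Date created" ": " "Date created: " rfl]
      · rw [pvSpecNone d.1 h1 h2]
        simp [pvBlk?, h1, h2]

-- concatenating "block ++ \n" equals the "\n"-join plus one trailing newline
lemma pvFlattenJoin (l : List (List Char)) (h : l ≠ []) :
    (l.map (· ++ ['\n'])).flatten = PySem.Chars.join ['\n'] l ++ ['\n'] := by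
  induction l with
  | nil => simp at h
  | cons x xs ih =>
    cases xs with
    | nil => simp [PySem.Chars.join_singleton]
    | cons y ys =>
      rw [List.map_cons, List.flatten_cons, ih (by simp), PySem.Chars.join_cons_cons]
      simp [List.append_assoc]

-- stripping ignores one trailing newline
lemma pvStripNewline (s : List Char) :
    PySem.Chars.strip (s ++ ['\n']) = PySem.Chars.strip s := by
  unfold PySem.Chars.strip PySem.Chars.lstrip PySem.Chars.rstrip
  rw [List.dropWhile_append]
  by_cases h : List.dropWhile PySem.Chars.isspace s = []
  · have h' : (List.dropWhile PySem.Chars.isspace s).isEmpty = true := by simp [h]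
    rw [if_pos h', h, show List.dropWhile PySem.Chars.isspace ['\n'] = [] from by decide]
  · rw [if_neg (by simp [h]), List.reverse_append,
      show (['\n'] : List Char).reverse = ['\n'] from rfl, List.singleton_append,
      List.dropWhile_cons_of_pos (by decide)]

-- ===== VERDICT (by name: the statement is the Claim_ definition above) =====
theorem print_hr_spec : Claim_equal_print_hr := by
  intro data _
  unfold Spec_print_hr print_hr print_hr_alt
  rw [pvFoldA, pvFoldB, List.nil_append]
  rw [← String.toList_inj, PySem.Str.toList_strip, PySem.Str.toList_strip,
    PySem.Str.toList_join, String.toList_append,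
    show ("" : String).toList = [] from rfl, List.nil_append,
    show ("\n" : String).toList = ['\n'] from rfl, pvConcat_toList, List.map_map]
  have hmap : (String.toList ∘ (fun x : String => x ++ "\n"))
      = (fun x : String => x.toList ++ ['\n']) := by
    funext x
    simp [String.toList_append]
  rw [hmap]
  rcases hbs : pvBlocks data with _ | ⟨b, bs⟩
  · rfl
  · rw [show List.map (fun x : String => x.toList ++ ['\n']) (b :: bs)
        = ((b :: bs).map String.toList).map (· ++ ['\n']) from by
          simp [List.map_map, Function.comp],
      pvFlattenJoin _ (by simp), pvStripNewline]
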